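-- pv_equiv track=rewrite | github.com/Nikole23/EduVVSU | M/Lab7.py | arrangements_of_n_by_3
-- ===== SOURCE A (Python) =====
-- def arrangements_of_n_by_3(n):
--     arrangements = []
--     count = 0
--     for i in range(n):
--         for j in range(n):
--             if j != i:
--                 for k in range(n):
--                     if k != i and k != j:
--                         arrangements.append((i, j, k))
--                         count += 1
--     formula_count = n * (n - 1) * (n - 2)  # Подсчет по формуле A(n, 3) = n * (n-1) * (n-2)
--     return (arrangements, count, formula_count)
-- ===== SOURCE B (Python) =====
-- def arrangements_of_n_by_3(n):
--     # Single flat loop: decode each m in range(n**3) as a base-n triple (i, j, k)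
--     # (lexicographic order, matching the nested-loop emission order) and keep the
--     # pairwise-distinct ones.
--     arrangements = []
--     append = arrangements.append
--     nn = n * n
--     for m in range(nn * n):
--         i, r = divmod(m, nn)
--         j, k = divmod(r, n)
--         if i != j and i != k and j != k:
--             append((i, j, k))
--     return (arrangements, len(arrangements), n * (n - 1) * (n - 2))
-- ===== Notes on version B (the rewrite author's own statement) =====
-- stated objective: alternative
-- what changed: Replaces the three nested index loops (with != filters and a running counter) by a single flat loop over range(n**3) that base-n-decodes each index into a triple via divmod and filters pairwise-distinct ones, taking the count as len(arrangements).
import Mathlib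
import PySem

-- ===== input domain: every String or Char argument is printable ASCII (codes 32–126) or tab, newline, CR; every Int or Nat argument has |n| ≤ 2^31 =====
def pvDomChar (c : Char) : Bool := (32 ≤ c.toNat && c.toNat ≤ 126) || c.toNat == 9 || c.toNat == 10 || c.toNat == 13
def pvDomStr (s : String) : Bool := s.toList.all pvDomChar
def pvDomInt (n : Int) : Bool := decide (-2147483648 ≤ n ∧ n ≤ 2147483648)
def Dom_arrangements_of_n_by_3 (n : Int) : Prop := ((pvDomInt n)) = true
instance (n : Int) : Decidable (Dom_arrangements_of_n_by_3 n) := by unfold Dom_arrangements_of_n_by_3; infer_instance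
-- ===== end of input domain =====

-- B replaces the three nested index loops by one flat loop over range(n^3) that
-- base-n-decodes each m into a triple via divmod and keeps the pairwise-distinct
-- ones (objective: alternative algorithm, same cost).

-- ===== PORT A =====
def arrangements_of_n_by_3 (n : Int) : (List (Int × Int × Int)) × Int × Int :=
  let s :=
    (PySem.List.pyRange 0 n 1).foldl (fun s i =>
      (PySem.List.pyRange 0 n 1).foldl (fun s j =>
        if j ≠ i then
          (PySem.List.pyRange 0 n 1).foldl (fun s k =>
            if k ≠ i ∧ k ≠ j then (s.1 ++ [(i, j, k)], s.2 + 1) else s) s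
        else s) s) (([] : List (Int × Int × Int)), (0 : Int))
  (s.1, s.2, n * (n - 1) * (n - 2))

-- ===== PORT B =====
def arrangements_of_n_by_3_alt (n : Int) : (List (Int × Int × Int)) × Int × Int :=
  let arrangements :=
    (PySem.List.pyRange 0 (n * n * n) 1).foldl (fun acc m =>
      let i := PySem.Int.floordiv m (n * n)
      let r := PySem.Int.mod m (n * n)
      let j := PySem.Int.floordiv r n
      let k := PySem.Int.mod r n
      if i ≠ j ∧ i ≠ k ∧ j ≠ k then acc ++ [(i, j, k)] else acc)
      ([] : List (Int × Int × Int))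
  (arrangements, (arrangements.length : Int), n * (n - 1) * (n - 2))

-- ===== PRECONDITION & SPEC =====
def Spec_arrangements_of_n_by_3 (n : Int) (out : (List (Int × Int × Int)) × Int × Int) : Prop := out = arrangements_of_n_by_3_alt n
instance (n : Int) (out : (List (Int × Int × Int)) × Int × Int) : Decidable (Spec_arrangements_of_n_by_3 n out) := by unfold Spec_arrangements_of_n_by_3; infer_instance

-- ===== CLAIM (what is proved, stated in full; the proofs are below) =====
def Claim_equal_arrangements_of_n_by_3 : Prop := ∀ (n : Int), Dom_arrangements_of_n_by_3 n → Spec_arrangements_of_n_by_3 n (arrangements_of_n_by_3 n)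

-- ===== LEMMAS AND PROOFS =====

-- a fold whose every step appends `out x` and adds its length produces the flatMap
lemma foldl_pair_flat {γ T : Type} (out : γ → List T)
    (step : (List T × Int) → γ → (List T × Int))
    (h : ∀ s x, step s x = (s.1 ++ out x, s.2 + ((out x).length : Int))) :
    ∀ (L : List γ) (s : List T × Int),
      L.foldl step s = (s.1 ++ L.flatMap out, s.2 + ((L.flatMap out).length : Int)) := by
  intro L
  induction L with
  | nil => intro s; simp
  | cons x L ih =>
    intro s
    rw [List.foldl_cons, h, ih]
    simp [List.append_assoc]
    omega

-- base-b decomposition of range (a*b)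
lemma rangeMul {T : Type} (F : Nat → Nat → List T) (b : Nat) :
    ∀ (a : Nat),
      (List.range (a * b)).flatMap (fun m => F (m / b) (m % b)) =
        (List.range a).flatMap (fun i => (List.range b).flatMap (fun r => F i r)) := by
  intro a
  induction a with
  | zero => simp
  | succ a ih =>
    have hab : (a + 1) * b = a * b + b := by ring
    rw [hab, List.range_add, List.flatMap_append, ih, List.range_succ,
      List.flatMap_append, List.flatMap_map]
    congr 1
    simp only [List.flatMap_cons, List.flatMap_nil, List.append_nil]
    apply List.flatMap_congr
    intro r hr
    have hrb : r < b := List.mem_range.mp hr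
    have hb : 0 < b := Nat.lt_of_le_of_lt (Nat.zero_le r) hrb
    have h1 : (a * b + r) / b = a := by
      rw [Nat.mul_comm a b, Nat.mul_add_div hb, Nat.div_eq_of_lt hrb]
      omega
    have h2 : (a * b + r) % b = r := by
      rw [Nat.mul_comm a b, Nat.mul_add_mod, Nat.mod_eq_of_lt hrb]
    rw [h1, h2]

-- the per-cell output lists of A's three loops
def out3A (i j k : Int) : List (Int × Int × Int) :=
  if k ≠ i ∧ k ≠ j then [(i, j, k)] else []
def out2A (n i j : Int) : List (Int × Int × Int) :=
  if j ≠ i then (PySem.List.pyRange 0 n 1).flatMap (out3A i j) else []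
def out1A (n i : Int) : List (Int × Int × Int) :=
  (PySem.List.pyRange 0 n 1).flatMap (out2A n i)
-- the per-cell output list of B's flat loop
def outB (n m : Int) : List (Int × Int × Int) :=
  if PySem.Int.floordiv m (n * n) ≠ PySem.Int.floordiv (PySem.Int.mod m (n * n)) n ∧
      PySem.Int.floordiv m (n * n) ≠ PySem.Int.mod (PySem.Int.mod m (n * n)) n ∧
      PySem.Int.floordiv (PySem.Int.mod m (n * n)) n ≠ PySem.Int.mod (PySem.Int.mod m (n * n)) n
  then [(PySem.Int.floordiv m (n * n), PySem.Int.floordiv (PySem.Int.mod m (n * n)) n,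
      PySem.Int.mod (PySem.Int.mod m (n * n)) n)]
  else []
-- one decoded cell, over Nat indices
def cellH (i j k : Nat) : List (Int × Int × Int) :=
  if ((i : Int) ≠ (j : Int) ∧ (i : Int) ≠ (k : Int) ∧ (j : Int) ≠ (k : Int))
  then [((i : Int), (j : Int), (k : Int))] else []

lemma A_closed (n : Int) :
    arrangements_of_n_by_3 n =
      ((PySem.List.pyRange 0 n 1).flatMap (out1A n),
        (((PySem.List.pyRange 0 n 1).flatMap (out1A n)).length : Int),
        n * (n - 1) * (n - 2)) := by
  unfold arrangements_of_n_by_3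
  have h3 : ∀ (i j : Int) (s : List (Int × Int × Int) × Int),
      (PySem.List.pyRange 0 n 1).foldl
          (fun s k => if k ≠ i ∧ k ≠ j then (s.1 ++ [(i, j, k)], s.2 + 1) else s) s =
        (s.1 ++ (PySem.List.pyRange 0 n 1).flatMap (out3A i j),
          s.2 + (((PySem.List.pyRange 0 n 1).flatMap (out3A i j)).length : Int)) := by
    intro i j s
    apply foldl_pair_flat
    intro s k
    unfold out3A
    split_ifs <;> simp
  have h2 : ∀ (i : Int) (s : List (Int × Int × Int) × Int),
      (PySem.List.pyRange 0 n 1).foldl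
          (fun s j =>
            if j ≠ i then
              (PySem.List.pyRange 0 n 1).foldl
                (fun s k => if k ≠ i ∧ k ≠ j then (s.1 ++ [(i, j, k)], s.2 + 1) else s) s
            else s) s =
        (s.1 ++ (PySem.List.pyRange 0 n 1).flatMap (out2A n i),
          s.2 + (((PySem.List.pyRange 0 n 1).flatMap (out2A n i)).length : Int)) := by
    intro i s
    apply foldl_pair_flat
    intro s j
    unfold out2A
    split_ifs with h
    · rw [h3]
    · simp
  have h1 :
      (PySem.List.pyRange 0 n 1).foldl
          (fun s i =>
            (PySem.List.pyRange 0 n 1).foldl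
              (fun s j =>
                if j ≠ i then
                  (PySem.List.pyRange 0 n 1).foldl
                    (fun s k => if k ≠ i ∧ k ≠ j then (s.1 ++ [(i, j, k)], s.2 + 1) else s) s
                else s) s)
          (([] : List (Int × Int × Int)), (0 : Int)) =
        ([] ++ (PySem.List.pyRange 0 n 1).flatMap (out1A n),
          0 + (((PySem.List.pyRange 0 n 1).flatMap (out1A n)).length : Int)) := by
    apply foldl_pair_flat
    intro s i
    unfold out1A
    rw [h2]
  rw [h1]
  simp

lemma B_closed (n : Int) :
    arrangements_of_n_by_3_alt n =
      ((PySem.List.pyRange 0 (n * n * n) 1).flatMap (outB n),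
        (((PySem.List.pyRange 0 (n * n * n) 1).flatMap (outB n)).length : Int),
        n * (n - 1) * (n - 2)) := by
  unfold arrangements_of_n_by_3_alt
  have h : (PySem.List.pyRange 0 (n * n * n) 1).foldl
      (fun acc m =>
        let i := PySem.Int.floordiv m (n * n)
        let r := PySem.Int.mod m (n * n)
        let j := PySem.Int.floordiv r n
        let k := PySem.Int.mod r n
        if i ≠ j ∧ i ≠ k ∧ j ≠ k then acc ++ [(i, j, k)] else acc)
      ([] : List (Int × Int × Int)) =
      [] ++ (PySem.List.pyRange 0 (n * n * n) 1).flatMap (outB n) := by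
    have hf : (fun (acc : List (Int × Int × Int)) (m : Int) =>
        let i := PySem.Int.floordiv m (n * n)
        let r := PySem.Int.mod m (n * n)
        let j := PySem.Int.floordiv r n
        let k := PySem.Int.mod r n
        if i ≠ j ∧ i ≠ k ∧ j ≠ k then acc ++ [(i, j, k)] else acc) =
        (fun acc m => acc ++ outB n m) := by
      funext acc m
      unfold outB
      dsimp only
      split_ifs <;> simp
    rw [hf, PySem.List.foldl_append_eq_flatMap]
  rw [h]
  simp

-- the core list identity: the flat decoded loop produces exactly A's nested output
lemma core_eq (n : Int) :
    (PySem.List.pyRange 0 n 1).flatMap (out1A n) =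
      (PySem.List.pyRange 0 (n * n * n) 1).flatMap (outB n) := by
  by_cases hn : n ≤ 0
  · have h1 : PySem.List.pyRange 0 n 1 = [] := PySem.List.pyRange_one_eq_nil hn
    have h2 : PySem.List.pyRange 0 (n * n * n) 1 = [] := by
      apply PySem.List.pyRange_one_eq_nil
      nlinarith [mul_self_nonneg n]
    rw [h1, h2]
    simp
  · have hn : 0 < n := by omega
    obtain ⟨N, rfl⟩ : ∃ N : Nat, n = (N : Int) := ⟨n.toNat, (Int.toNat_of_nonneg hn.le).symm⟩
    have hR : PySem.List.pyRange 0 (N : Int) 1 =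
        (List.range N).map (fun k : Nat => (k : Int)) := by
      rw [PySem.List.pyRange_one]
      simp
    have hM : PySem.List.pyRange 0 ((N : Int) * N * N) 1 =
        (List.range (N * (N * N))).map (fun k : Nat => (k : Int)) := by
      rw [PySem.List.pyRange_one]
      have ht : (((N : Int) * N * N) - 0).toNat = N * (N * N) := by
        have : ((N : Int) * N * N - 0) = ((N * (N * N) : Nat) : Int) := by push_cast; ring
        rw [this, Int.toNat_natCast]
      rw [ht]
      simp
    have hB : ∀ m : Nat,
        outB (N : Int) (m : Int) = cellH (m / (N * N)) (m % (N * N) / N) (m % (N * N) % N) := by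
      intro m
      unfold outB cellH
      have hnn : ((N : Int) * N) = ((N * N : Nat) : Int) := by push_cast; ring
      rw [hnn]
      simp only [PySem.Int.floordiv_natCast, PySem.Int.mod_natCast]
    have hA : (List.range N).flatMap (fun i : Nat => out1A (N : Int) (i : Int)) =
        (List.range N).flatMap (fun i : Nat =>
          (List.range N).flatMap (fun j : Nat =>
            (List.range N).flatMap (fun k : Nat => cellH i j k))) := by
      apply List.flatMap_congr
      intro i _
      unfold out1A
      rw [hR, List.flatMap_map]
      apply List.flatMap_congr
      intro j _
      unfold out2A
      by_cases hij : (j : Int) = (i : Int)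
      · rw [if_neg (by simpa using hij)]
        have hz : ∀ k ∈ List.range N, cellH i j k = ([] : List (Int × Int × Int)) := by
          intro k _
          unfold cellH
          rw [if_neg]
          intro hc
          exact hc.1 hij.symm
        rw [List.flatMap_congr hz]
        simp
      · rw [if_pos (by simpa using hij)]
        rw [hR, List.flatMap_map]
        apply List.flatMap_congr
        intro k _
        unfold out3A cellH
        split_ifs <;> first | rfl | omega
    rw [hR, hM, List.flatMap_map, List.flatMap_map, hA]
    calc (List.range N).flatMap (fun i : Nat =>
            (List.range N).flatMap (fun j : Nat =>
              (List.range N).flatMap (fun k : Nat => cellH i j k)))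
        = (List.range N).flatMap (fun i : Nat =>
            (List.range (N * N)).flatMap (fun r : Nat => cellH i (r / N) (r % N))) :=
          List.flatMap_congr (fun i _ => (rangeMul (fun j k => cellH i j k) N N).symm)
      _ = (List.range (N * (N * N))).flatMap
            (fun m : Nat => cellH (m / (N * N)) (m % (N * N) / N) (m % (N * N) % N)) := by
          exact (rangeMul (fun a r => cellH a (r / N) (r % N)) (N * N) N).symm
      _ = (List.range (N * (N * N))).flatMap (fun m : Nat => outB (N : Int) (m : Int)) :=
          List.flatMap_congr (fun m _ => (hB m).symm)

-- ===== VERDICT (by name: the statement is the Claim_ definition above) =====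
theorem arrangements_of_n_by_3_spec : Claim_equal_arrangements_of_n_by_3 := by
  intro n _
  unfold Spec_arrangements_of_n_by_3
  rw [A_closed, B_closed, core_eq]
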